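-- pv_equiv track=rewrite | github.com/ahar0n/python-notebooks | 02 Control de flujo/solucion/ppu_digito_verificador.py | valida_longitud
-- ===== SOURCE A (Python) =====
-- def valida_longitud(ppu):
--     cuenta = 0
--     for caracter in ppu:
--         cuenta += 1
--     if cuenta == 6:
--         return True
--     else:
--         return False
-- ===== SOURCE B (Python) =====
-- def valida_longitud(ppu):
--     return len(ppu) == 6
-- ===== Notes on version B (the rewrite author's own statement) =====
-- stated objective: idiomatic
-- what changed: Replaced the element-by-element counting loop and if/else boolean with a single closed-form length comparison len(ppu) == 6.
import Mathlib
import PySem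

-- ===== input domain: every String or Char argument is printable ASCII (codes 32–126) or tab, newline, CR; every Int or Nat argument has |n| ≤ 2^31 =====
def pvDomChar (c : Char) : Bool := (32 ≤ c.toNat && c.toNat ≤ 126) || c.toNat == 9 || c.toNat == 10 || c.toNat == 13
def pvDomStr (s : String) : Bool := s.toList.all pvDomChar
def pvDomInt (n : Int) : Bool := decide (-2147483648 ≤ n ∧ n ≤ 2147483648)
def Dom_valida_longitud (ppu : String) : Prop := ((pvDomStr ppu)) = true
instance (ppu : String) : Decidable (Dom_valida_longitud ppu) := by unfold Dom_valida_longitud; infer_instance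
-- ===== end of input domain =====

-- B replaces A's character-counting loop with a single length comparison (idiomatic).


-- ===== PORT A =====
-- Port of A: count characters with a fold, then compare the counter with 6.
def valida_longitud (ppu : String) : Bool :=
  let cuenta := ppu.toList.foldl (fun acc _ => acc + 1) (0 : Int)
  if cuenta == 6 then true else false

-- ===== PORT B =====
-- Port of B (idiomatic): direct length comparison.
def valida_longitud_alt (ppu : String) : Bool :=
  PySem.Str.len ppu == 6

-- ===== PRECONDITION & SPEC =====
def Spec_valida_longitud (ppu : String) (out : Bool) : Prop := out = valida_longitud_alt ppu
instance (ppu : String) (out : Bool) : Decidable (Spec_valida_longitud ppu out) := by unfold Spec_valida_longitud; infer_instance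

-- ===== CLAIM (what is proved, stated in full; the proofs are below) =====
def Claim_equal_valida_longitud : Prop := ∀ (ppu : String), Dom_valida_longitud ppu → Spec_valida_longitud ppu (valida_longitud ppu)

-- ===== LEMMAS AND PROOFS =====

lemma foldl_count (l : List Char) :
    l.foldl (fun acc _ => acc + 1) (0 : Int) = (l.length : Int) := by
  have h : ∀ (init : Int), l.foldl (fun acc _ => acc + 1) init = init + l.length := by
    induction l with
    | nil => intro init; simp
    | cons x xs ih => intro init; simp [List.foldl, ih]; omega
  simpa using h 0

-- ===== VERDICT (by name: the statement is the Claim_ definition above) =====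
theorem valida_longitud_spec : Claim_equal_valida_longitud := by
  intro ppu _
  unfold Spec_valida_longitud valida_longitud valida_longitud_alt
  rw [foldl_count ppu.toList, PySem.Str.len_eq]
  by_cases h : ((ppu.length : Int) = 6) <;> simp [h]
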